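-- pv_equiv track=rewrite | github.com/harneet2512/groundtruth | benchmarks/swebench/gt_hook.py | _format_analyze_output
-- ===== SOURCE A (Python) =====
-- def _format_analyze_output(
--     test_lines: list[str],
--     ego_output: str,
--     sibling_lines: list[str],
--     obligations: list[str],
-- ) -> str:
--     """Combine all signal sections into a single output with line budget."""
--     all_lines: list[str] = ["=== GT CODEBASE INTELLIGENCE ===", ""]
--
--     # Tests section (up to 7 lines)
--     if test_lines:
--         all_lines.extend(test_lines[:7])
--         all_lines.append("")
--
--     # Connected code section (ego-graph, already formatted)
--     if ego_output:
--         all_lines.extend(ego_output.split("\n")[:20])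
--         all_lines.append("")
--
--     # Similar section (up to 10 lines)
--     if sibling_lines:
--         all_lines.extend(sibling_lines[:10])
--         all_lines.append("")
--
--     # Obligations (up to 5 lines, only if not already in ego_output)
--     if obligations and "--- OBLIGATIONS ---" not in ego_output:
--         all_lines.append("--- OBLIGATIONS ---")
--         all_lines.extend(obligations[:4])
--
--     # Trim trailing blanks
--     while all_lines and not all_lines[-1].strip():
--         all_lines.pop()
--
--     return "\n".join(all_lines)
-- ===== SOURCE B (Python) =====
-- def _format_analyze_output(
--     test_lines: list[str],
--     ego_output: str,
--     sibling_lines: list[str],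
--     obligations: list[str],
-- ) -> str:
--     """Assemble the fired sections as blocks, join with blank-line separators,
--     and cut at the last non-blank line (forward scan instead of while-pop)."""
--     sections = [["=== GT CODEBASE INTELLIGENCE ==="]]
--     if test_lines:
--         sections.append(test_lines[:7])
--     if ego_output:
--         sections.append(ego_output.split("\n")[:20])
--     if sibling_lines:
--         sections.append(sibling_lines[:10])
--     if obligations and "--- OBLIGATIONS ---" not in ego_output:
--         sections.append(["--- OBLIGATIONS ---"] + obligations[:4])
--     lines: list[str] = []
--     for sec in sections:
--         if lines:
--             lines.append("")
--         lines.extend(sec)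
--     last = -1
--     for i, ln in enumerate(lines):
--         if ln.strip():
--             last = i
--     return "\n".join(lines[: last + 1])
-- ===== Notes on version B (the rewrite author's own statement) =====
-- stated objective: alternative
-- what changed: B assembles each fired signal section as a standalone block in a list, joins the blocks with blank-line separators in one fold, and truncates at the last non-blank line found by a single forward scan, instead of A's flat line buffer with conditional appends and a trailing while-pop trim.
import Mathlib
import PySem

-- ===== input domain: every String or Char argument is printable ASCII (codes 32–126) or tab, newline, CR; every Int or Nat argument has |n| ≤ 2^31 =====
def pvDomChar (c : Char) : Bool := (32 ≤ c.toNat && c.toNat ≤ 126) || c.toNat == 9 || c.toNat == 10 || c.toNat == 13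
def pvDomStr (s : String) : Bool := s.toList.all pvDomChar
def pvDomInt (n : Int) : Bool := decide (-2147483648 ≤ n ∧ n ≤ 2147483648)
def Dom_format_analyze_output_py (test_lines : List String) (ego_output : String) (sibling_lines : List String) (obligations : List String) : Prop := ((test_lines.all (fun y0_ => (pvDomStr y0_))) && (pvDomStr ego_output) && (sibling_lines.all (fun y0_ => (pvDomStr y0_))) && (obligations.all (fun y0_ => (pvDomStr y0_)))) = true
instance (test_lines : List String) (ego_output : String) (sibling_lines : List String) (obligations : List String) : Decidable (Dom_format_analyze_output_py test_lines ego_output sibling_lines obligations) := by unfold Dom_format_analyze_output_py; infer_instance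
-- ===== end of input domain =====

-- B builds the fired sections as standalone blocks joined by blank-line separators and cuts
-- at the last non-blank line (forward scan) instead of A's flat append buffer with a
-- trailing while-pop; same result, different decomposition (objective: alternative).

-- ===== PORT A =====
-- A's `while all_lines and not all_lines[-1].strip(): all_lines.pop()`, run on the reversed list
def aTrimRev : List String → List String
  | [] => []
  | x :: xs => if PySem.Str.strip x = "" then aTrimRev xs else x :: xs

def format_analyze_output_py (test_lines : List String) (ego_output : String) (sibling_lines : List String) (obligations : List String) : String :=
  let all0 : List String := ["=== GT CODEBASE INTELLIGENCE ===", ""]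
  let all1 := if test_lines ≠ [] then all0 ++ test_lines.take 7 ++ [""] else all0
  let all2 := if ego_output ≠ "" then all1 ++ ((PySem.Str.split? ego_output "\n").getD []).take 20 ++ [""] else all1
  let all3 := if sibling_lines ≠ [] then all2 ++ sibling_lines.take 10 ++ [""] else all2
  let all4 := if obligations ≠ [] ∧ PySem.Str.isIn "--- OBLIGATIONS ---" ego_output = false
              then all3 ++ ["--- OBLIGATIONS ---"] ++ obligations.take 4 else all3
  PySem.Str.join "\n" (aTrimRev all4.reverse).reverse

-- ===== PORT B =====
def bSections (test_lines : List String) (ego_output : String) (sibling_lines : List String) (obligations : List String) : List (List String) :=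
  let s0 : List (List String) := [["=== GT CODEBASE INTELLIGENCE ==="]]
  let s1 := if test_lines ≠ [] then s0 ++ [test_lines.take 7] else s0
  let s2 := if ego_output ≠ "" then s1 ++ [((PySem.Str.split? ego_output "\n").getD []).take 20] else s1
  let s3 := if sibling_lines ≠ [] then s2 ++ [sibling_lines.take 10] else s2
  if obligations ≠ [] ∧ PySem.Str.isIn "--- OBLIGATIONS ---" ego_output = false
  then s3 ++ [["--- OBLIGATIONS ---"] ++ obligations.take 4] else s3

-- `for sec in sections: if lines: lines.append(""); lines.extend(sec)`
def bJoin (secs : List (List String)) : List String :=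
  secs.foldl (fun acc sec => if acc ≠ [] then acc ++ [""] ++ sec else acc ++ sec) []

-- `last = -1; for i, ln in enumerate(lines): if ln.strip(): last = i`
def bLast (lines : List String) : Int :=
  (PySem.List.enumerate lines).foldl (fun last p => if PySem.Str.strip p.2 ≠ "" then p.1 else last) (-1)

def format_analyze_output_py_alt (test_lines : List String) (ego_output : String) (sibling_lines : List String) (obligations : List String) : String :=
  let lines := bJoin (bSections test_lines ego_output sibling_lines obligations)
  PySem.Str.join "\n" (PySem.List.slice lines none (some (bLast lines + 1)))

-- ===== PRECONDITION & SPEC =====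
def Spec_format_analyze_output_py (test_lines : List String) (ego_output : String) (sibling_lines : List String) (obligations : List String) (out : String) : Prop := out = format_analyze_output_py_alt test_lines ego_output sibling_lines obligations
instance (test_lines : List String) (ego_output : String) (sibling_lines : List String) (obligations : List String) (out : String) : Decidable (Spec_format_analyze_output_py test_lines ego_output sibling_lines obligations out) := by unfold Spec_format_analyze_output_py; infer_instance

-- ===== CLAIM (what is proved, stated in full; the proofs are below) =====
def Claim_equal_format_analyze_output_py : Prop := ∀ (test_lines : List String) (ego_output : String) (sibling_lines : List String) (obligations : List String), Dom_format_analyze_output_py test_lines ego_output sibling_lines obligations → Spec_format_analyze_output_py test_lines ego_output sibling_lines obligations (format_analyze_output_py test_lines ego_output sibling_lines obligations)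

-- ===== LEMMAS AND PROOFS =====

theorem bLast_append (l : List String) (x : String) :
    bLast (l ++ [x]) = if PySem.Str.strip x ≠ "" then (l.length : Int) else bLast l := by
  unfold bLast
  rw [PySem.List.enumerate_append, List.foldl_append]
  simp [PySem.List.enumerate_cons, PySem.List.enumerate_nil]

theorem bLast_bounds (l : List String) : -1 ≤ bLast l ∧ bLast l < (l.length : Int) := by
  induction l using List.reverseRecOn with
  | nil => exact ⟨le_refl _, by norm_num [bLast, PySem.List.enumerate_nil]⟩
  | append_singleton l x ih =>
    rw [bLast_append]
    rcases ih with ⟨h1, h2⟩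
    by_cases h : PySem.Str.strip x = ""
    · simp [h]; try omega
    · simp [h]; try omega

theorem trim_eq (l : List String) :
    (aTrimRev l.reverse).reverse = l.take (bLast l + 1).toNat := by
  induction l using List.reverseRecOn with
  | nil => simp [aTrimRev, bLast, PySem.List.enumerate_nil]
  | append_singleton l x ih =>
    rw [List.reverse_append, bLast_append]
    by_cases h : PySem.Str.strip x = ""
    · simp only [h, ne_eq, not_true_eq_false, if_false]
      have hb := bLast_bounds l
      have hle : (bLast l + 1).toNat ≤ l.length := by omega
      rw [show ([x].reverse ++ l.reverse) = x :: l.reverse by simp, aTrimRev, if_pos h, ih,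
        List.take_append_of_le_length hle]
    · simp only [h, ne_eq, not_false_eq_true, if_true]
      rw [show ([x].reverse ++ l.reverse) = x :: l.reverse by simp, aTrimRev, if_neg h]
      have : ((l.length : Int) + 1).toNat = l.length + 1 := by omega
      simp [this, List.take_append]

theorem trim_drop_blank (l : List String) :
    aTrimRev ((l ++ [""]).reverse) = aTrimRev l.reverse := by
  rw [List.reverse_append]
  have : PySem.Str.strip "" = "" := by decide
  simp [aTrimRev, this]

-- B's trimmed list, written in A's form
theorem alt_as_trim (lines : List String) :
    PySem.List.slice lines none (some (bLast lines + 1)) = (aTrimRev lines.reverse).reverse := by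
  have hb := bLast_bounds lines
  rw [PySem.List.slice_to lines (show (0:Int) ≤ bLast lines + 1 by omega), trim_eq]

theorem join_trim_congr (a b : List String) (h : a = b) :
    PySem.Str.join "\n" (aTrimRev a.reverse).reverse = PySem.Str.join "\n" (aTrimRev b.reverse).reverse := by
  rw [h]

theorem join_trim_congr_blank (a b : List String) (h : a = b ++ [""]) :
    PySem.Str.join "\n" (aTrimRev a.reverse).reverse = PySem.Str.join "\n" (aTrimRev b.reverse).reverse := by
  rw [h, trim_drop_blank]

-- ===== VERDICT (by name: the statement is the Claim_ definition above) =====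
set_option maxHeartbeats 1000000 in
theorem format_analyze_output_py_spec : Claim_equal_format_analyze_output_py := by
  intro test_lines ego_output sibling_lines obligations _
  simp only [Spec_format_analyze_output_py, format_analyze_output_py, format_analyze_output_py_alt,
    bSections, bJoin]
  rw [alt_as_trim]
  split_ifs <;>
    first
      | (apply join_trim_congr; simp [List.foldl_cons, List.foldl_nil]; done)
      | (apply join_trim_congr_blank; simp [List.foldl_cons, List.foldl_nil])
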